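-- pv_equiv track=rewrite | github.com/namitsinhaSOAR/marketplace | integrations/third_party/chronicle_support_tools/core/CollectAgentLogs.py | parse_connector_runner_logs
-- ===== SOURCE A (Python) =====
-- connector_runner_log_identifier = "runner - ERROR -"
--
-- def parse_connector_runner_logs(textData):
--     errorCapture = ""
--     allErrors = []
--     keepCapturing = False
--
--     for x in textData:
--         # TODO dont capture self log.
--         if ("runner - WARNING" in x or "runner - INFO" in x) and keepCapturing:
--             keepCapturing = False
--             allErrors.append(errorCapture)
--             errorCapture = ""
--
--         if (connector_runner_log_identifier in x) or keepCapturing: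
--             errorCapture += x + "\n"
--             keepCapturing = True
--
--     totalErrorCount = len(allErrors)
--
--     return allErrors[5:], totalErrorCount
-- ===== SOURCE B (Python) =====
-- connector_runner_log_identifier = "runner - ERROR -"
--
--
-- def parse_connector_runner_logs(textData):
--     # Block scanner: jump to the next line holding the ERROR marker, then take
--     # lines up to the next WARNING/INFO terminator line; a block with no
--     # terminator is dropped.  The terminator line may itself start a new block.
--     n = len(textData)
--     blocks = []
--     i = 0
--     while i < n:
--         if connector_runner_log_identifier not in textData[i]:
--             i += 1
--             continue
--         j = i + 1
--         while j < n and "runner - WARNING" not in textData[j] and "runner - INFO" not in textData[j]: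
--             j += 1
--         if j == n:
--             break
--         blocks.append("".join(line + "\n" for line in textData[i:j]))
--         i = j
--     return blocks[5:], len(blocks)
-- ===== Notes on version B (the rewrite author's own statement) =====
-- stated objective: alternative
-- what changed: Replaces the single fold carrying (errorCapture, keepCapturing) mutable state with a stateless block scanner that jumps to the next ERROR line, spans forward to the WARNING/INFO terminator, and joins the spanned lines into a block in one step.
import Mathlib
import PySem

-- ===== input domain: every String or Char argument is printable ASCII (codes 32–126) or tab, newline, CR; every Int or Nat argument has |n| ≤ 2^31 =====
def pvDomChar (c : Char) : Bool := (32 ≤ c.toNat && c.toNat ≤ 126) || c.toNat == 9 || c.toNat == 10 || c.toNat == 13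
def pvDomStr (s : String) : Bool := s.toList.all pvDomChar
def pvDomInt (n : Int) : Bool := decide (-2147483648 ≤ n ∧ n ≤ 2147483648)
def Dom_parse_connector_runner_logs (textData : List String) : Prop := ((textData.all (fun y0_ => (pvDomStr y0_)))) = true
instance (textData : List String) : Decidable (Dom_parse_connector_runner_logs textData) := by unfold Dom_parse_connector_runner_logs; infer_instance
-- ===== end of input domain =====

-- B replaces A's fold carrying (errorCapture, keepCapturing) state with a stateless
-- block scanner (skip to ERROR line, span to the WARNING/INFO terminator); same cost.

-- the two Python substring tests both sources use ('in' = PySem.Str.isIn)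
def pvIsErr (x : String) : Bool := PySem.Str.isIn "runner - ERROR -" x
def pvIsTerm (x : String) : Bool :=
  PySem.Str.isIn "runner - WARNING" x || PySem.Str.isIn "runner - INFO" x

-- ===== PORT A =====
def pvStepA (st : String × List String × Bool) (x : String) : String × List String × Bool :=
  let st1 := if pvIsTerm x && st.2.2 then ("", st.2.1 ++ [st.1], false) else st
  if pvIsErr x || st1.2.2 then (st1.1 ++ x ++ "\n", st1.2.1, true) else st1

def parse_connector_runner_logs (textData : List String) : List String × Int :=
  let st := textData.foldl pvStepA ("", [], false)
  (PySem.List.slice st.2.1 (some 5) none, (st.2.1.length : Int))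

-- ===== PORT B =====
-- '"".join(line + "\n" for line in lines)'
def pvJoinBlock (lines : List String) : String :=
  PySem.Str.join "" (lines.map (fun l => l ++ "\n"))

-- the outer while loop of B: skip to an ERROR line, span to the terminator
-- ('if j == n: break' is the isEmpty test on the spanned remainder)
def pvBlocks : List String → List String
  | [] => []
  | x :: rest =>
    if pvIsErr x then
      if (rest.dropWhile (fun l => !pvIsTerm l)).isEmpty then []
      else pvJoinBlock (x :: rest.takeWhile (fun l => !pvIsTerm l))
             :: pvBlocks (rest.dropWhile (fun l => !pvIsTerm l))
    else pvBlocks rest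
termination_by l => l.length
decreasing_by
  · have hle := List.length_dropWhile_le (p := fun l => !pvIsTerm l) (l := rest)
    simp; omega
  · simp

def parse_connector_runner_logs_alt (textData : List String) : List String × Int :=
  let blocks := pvBlocks textData
  (PySem.List.slice blocks (some 5) none, (blocks.length : Int))

-- ===== PRECONDITION & SPEC =====
def Spec_parse_connector_runner_logs (textData : List String) (out : List String × Int) : Prop := out = parse_connector_runner_logs_alt textData
instance (textData : List String) (out : List String × Int) : Decidable (Spec_parse_connector_runner_logs textData out) := by unfold Spec_parse_connector_runner_logs; infer_instance

-- ===== CLAIM (what is proved, stated in full; the proofs are below) =====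
def Claim_equal_parse_connector_runner_logs : Prop := ∀ (textData : List String), Dom_parse_connector_runner_logs textData → Spec_parse_connector_runner_logs textData (parse_connector_runner_logs textData)

-- ===== LEMMAS AND PROOFS =====

lemma pvJoin_empty_cons (p : List Char) (rest : List (List Char)) :
    PySem.Chars.join [] (p :: rest) = p ++ PySem.Chars.join [] rest := by
  cases rest with
  | nil => simp [PySem.Chars.join, List.intercalate]
  | cons q u => rw [PySem.Chars.join_cons_cons]; simp

lemma pvJoinBlock_nil : pvJoinBlock [] = "" := rfl

lemma pvJoinBlock_cons (x : String) (t : List String) :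
    pvJoinBlock (x :: t) = (x ++ "\n") ++ pvJoinBlock t := by
  apply String.toList_inj.mp
  simp only [pvJoinBlock, PySem.Str.join, String.toList_ofList, List.map_cons,
    String.toList_append, String.toList_empty, pvJoin_empty_cons]

-- unfolding lemmas for B's scanner
lemma pvBlocks_cons_err (x : String) (rest : List String) (he : pvIsErr x = true) :
    pvBlocks (x :: rest)
      = if (rest.dropWhile (fun l => !pvIsTerm l)).isEmpty then []
        else pvJoinBlock (x :: rest.takeWhile (fun l => !pvIsTerm l))
               :: pvBlocks (rest.dropWhile (fun l => !pvIsTerm l)) := by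
  rw [pvBlocks, if_pos he]

lemma pvBlocks_cons_noerr (x : String) (rest : List String) (he : pvIsErr x = false) :
    pvBlocks (x :: rest) = pvBlocks rest := by
  rw [pvBlocks, if_neg (by simp [he])]

-- the shapes one loop step of A can take
lemma pvStepA_false (cap : String) (errs : List String) (x : String) :
    pvStepA (cap, errs, false) x
      = if pvIsErr x then (cap ++ x ++ "\n", errs, true) else (cap, errs, false) := by
  simp [pvStepA]

lemma pvStepA_true_term (cap : String) (errs : List String) (x : String)
    (ht : pvIsTerm x = true) :
    pvStepA (cap, errs, true) x
      = if pvIsErr x then ("" ++ x ++ "\n", errs ++ [cap], true)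
        else ("", errs ++ [cap], false) := by
  simp [pvStepA, ht]

lemma pvStepA_true_noterm (cap : String) (errs : List String) (x : String)
    (ht : pvIsTerm x = false) :
    pvStepA (cap, errs, true) x = (cap ++ x ++ "\n", errs, true) := by
  simp [pvStepA, ht]

-- the central invariant: A's fold accumulates exactly B's blocks
lemma pvMain (l : List String) : ∀ (errs : List String) (cap : String),
    (l.foldl pvStepA ("", errs, false)).2.1 = errs ++ pvBlocks l ∧
    (l.foldl pvStepA (cap, errs, true)).2.1 =
      (if (l.dropWhile (fun l => !pvIsTerm l)).isEmpty then errs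
       else errs ++ (cap ++ pvJoinBlock (l.takeWhile (fun l => !pvIsTerm l)))
              :: pvBlocks (l.dropWhile (fun l => !pvIsTerm l))) := by
  induction l with
  | nil => intro errs cap; simp [pvBlocks]
  | cons x rest ih =>
    intro errs cap
    constructor
    · -- non-capturing state
      rw [List.foldl_cons, pvStepA_false]
      by_cases he : pvIsErr x = true
      · rw [if_pos he, show ("" : String) ++ x ++ "\n" = "" ++ x ++ "\n" from rfl,
          (ih errs ("" ++ x ++ "\n")).2, pvBlocks_cons_err x rest he]
        by_cases hie : (rest.dropWhile (fun l => !pvIsTerm l)).isEmpty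
        · simp [hie]
        · simp [hie, pvJoinBlock_cons]
      · rw [if_neg he, (ih errs cap).1,
          pvBlocks_cons_noerr x rest (by simpa using he)]
    · -- capturing state, accumulated capture cap
      by_cases ht : pvIsTerm x = true
      · -- terminator line: the open block closes here (and may reopen at x)
        have hdw : (x :: rest).dropWhile (fun l => !pvIsTerm l) = x :: rest := by
          simp [ht]
        have htw : (x :: rest).takeWhile (fun l => !pvIsTerm l) = [] := by
          simp [ht]
        rw [List.foldl_cons, pvStepA_true_term _ _ _ ht, hdw, htw]
        by_cases he : pvIsErr x = true
        · rw [if_pos he, (ih (errs ++ [cap]) ("" ++ x ++ "\n")).2,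
            pvBlocks_cons_err x rest he]
          by_cases hie : (rest.dropWhile (fun l => !pvIsTerm l)).isEmpty
          · simp [hie, pvJoinBlock_nil]
          · simp [hie, pvJoinBlock_nil, pvJoinBlock_cons]
        · rw [if_neg he, (ih (errs ++ [cap]) cap).1,
            pvBlocks_cons_noerr x rest (by simpa using he)]
          simp [pvJoinBlock_nil]
      · -- not a terminator: the line is appended to the open capture
        have ht' : pvIsTerm x = false := by simpa using ht
        rw [List.foldl_cons, pvStepA_true_noterm _ _ _ ht',
          (ih errs (cap ++ x ++ "\n")).2]
        have hdw : (x :: rest).dropWhile (fun l => !pvIsTerm l)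
                 = rest.dropWhile (fun l => !pvIsTerm l) := by
          simp [ht']
        have htw : (x :: rest).takeWhile (fun l => !pvIsTerm l)
                 = x :: rest.takeWhile (fun l => !pvIsTerm l) := by
          simp [ht']
        rw [hdw, htw]
        by_cases hie : (rest.dropWhile (fun l => !pvIsTerm l)).isEmpty
        · simp [hie]
        · simp [hie, pvJoinBlock_cons, String.append_assoc]

-- ===== VERDICT (by name: the statement is the Claim_ definition above) =====
theorem parse_connector_runner_logs_spec : Claim_equal_parse_connector_runner_logs := by
  intro textData _
  unfold Spec_parse_connector_runner_logs parse_connector_runner_logs parse_connector_runner_logs_alt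
  have h := (pvMain textData [] "").1
  simp only [List.nil_append] at h
  simp [h]
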